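-- pv_equiv track=rewrite | github.com/watterso/advent-code-2023 | advent_code_2023/day-01/part2.py | get_left_most_digit
-- ===== SOURCE A (Python) =====
-- WORD_TO_DIGIT_LOOKUP = {
--     "one": 1,
--     "two": 2,
--     "three": 3,
--     "four": 4,
--     "five": 5,
--     "six": 6,
--     "seven": 7,
--     "eight": 8,
--     "nine": 9,
-- }
--
-- def get_left_most_digit(
--     line: str, word_digit_to_value: dict[str, int] = WORD_TO_DIGIT_LOOKUP
-- ) -> int:
--     chars_so_far = []
--     for char in line:
--         if char.isdigit():
--             return int(char)
--         else:
--             chars_so_far.append(char)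
--             chars_so_far_str = "".join(chars_so_far)
--             for word_digit in word_digit_to_value.keys():
--                 if word_digit in chars_so_far_str:
--                     return word_digit_to_value[word_digit]
--     return -99999999
-- ===== SOURCE B (Python) =====
-- WORD_TO_DIGIT_LOOKUP = {
--     "one": 1,
--     "two": 2,
--     "three": 3,
--     "four": 4,
--     "five": 5,
--     "six": 6,
--     "seven": 7,
--     "eight": 8,
--     "nine": 9,
-- }
--
-- def get_left_most_digit(
--     line: str, word_digit_to_value: dict[str, int] = WORD_TO_DIGIT_LOOKUP
-- ) -> int:
--     # Single scan: at each position check only the words ENDING here, instead of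
--     # rebuilding the prefix and re-scanning it for every word.
--     items = list(word_digit_to_value.items())
--     for i in range(len(line)):
--         ch = line[i]
--         if ch.isdigit():
--             return int(ch)
--         for word, value in items:
--             if line.endswith(word, 0, i + 1):
--                 return value
--     return -99999999
-- ===== Notes on version B (the rewrite author's own statement) =====
-- stated objective: alternative
-- what changed: Instead of rebuilding the growing prefix string and scanning it for every word at every character, B scans the line once and at each position tests only whether some word ends exactly there (endswith on a fixed window).
import Mathlib
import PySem

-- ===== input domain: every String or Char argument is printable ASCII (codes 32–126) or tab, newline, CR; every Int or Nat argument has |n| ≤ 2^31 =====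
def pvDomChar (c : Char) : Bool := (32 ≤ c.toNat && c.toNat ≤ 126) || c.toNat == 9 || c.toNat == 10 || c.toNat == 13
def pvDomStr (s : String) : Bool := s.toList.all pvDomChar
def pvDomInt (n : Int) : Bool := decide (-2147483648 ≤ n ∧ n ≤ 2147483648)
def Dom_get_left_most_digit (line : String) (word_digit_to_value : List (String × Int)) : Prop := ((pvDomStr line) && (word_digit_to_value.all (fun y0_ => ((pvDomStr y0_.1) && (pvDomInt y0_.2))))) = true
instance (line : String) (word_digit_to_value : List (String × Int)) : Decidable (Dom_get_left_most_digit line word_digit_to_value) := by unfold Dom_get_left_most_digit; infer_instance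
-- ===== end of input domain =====

-- B replaces A's rebuild-the-prefix-and-rescan-it-per-word search by a single left-to-right
-- scan that compares only the fixed-length window ending at each position with each word.

-- ===== PORT A =====
-- int(char) for an ASCII digit character
def pvDigitVal (c : Char) : Int := (c.toNat : Int) - 48

def pvGoA (d : PySem.Dict String Int) (seen : List Char) (rest : List Char) : Int :=
  match rest with
  | [] => -99999999
  | c :: cs =>
    if PySem.Chars.isdigit c then pvDigitVal c
    else
      let seen' := seen ++ [c]
      match d.keys.find? (fun w => PySem.Chars.isIn w.toList seen') with
      | some w => d.getD w 0
      | none => pvGoA d seen' cs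

def get_left_most_digit (line : String) (word_digit_to_value : List (String × Int)) : Int :=
  pvGoA (PySem.Dict.ofList word_digit_to_value) [] line.toList

-- ===== PORT B =====
-- line.endswith(word, 0, i+1): hand port, exact since s.endswith(p, 0, e) with 0 <= e
-- is s[:e].endswith(p)
def pvSuffixHit (s : List Char) (i : Nat) (p : String × Int) : Bool :=
  PySem.Chars.endswith (s.take (i + 1)) p.1.toList

def pvGoB (s : List Char) (items : List (String × Int)) (i : Nat) : Int :=
  if h : i < s.length then
    if PySem.Chars.isdigit s[i] then pvDigitVal s[i]
    else
      match items.find? (pvSuffixHit s i) with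
      | some p => p.2
      | none => pvGoB s items (i + 1)
  else -99999999
termination_by s.length - i

def get_left_most_digit_alt (line : String) (word_digit_to_value : List (String × Int)) : Int :=
  pvGoB line.toList (PySem.Dict.ofList word_digit_to_value).items 0

-- ===== PRECONDITION & SPEC =====
def Spec_get_left_most_digit (line : String) (word_digit_to_value : List (String × Int)) (out : Int) : Prop := out = get_left_most_digit_alt line word_digit_to_value
instance (line : String) (word_digit_to_value : List (String × Int)) (out : Int) : Decidable (Spec_get_left_most_digit line word_digit_to_value out) := by unfold Spec_get_left_most_digit; infer_instance

-- ===== CLAIM (what is proved, stated in full; the proofs are below) =====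
def Claim_equal_get_left_most_digit : Prop := ∀ (line : String) (word_digit_to_value : List (String × Int)), Dom_get_left_most_digit line word_digit_to_value → Spec_get_left_most_digit line word_digit_to_value (get_left_most_digit line word_digit_to_value)

-- ===== LEMMAS AND PROOFS =====

-- an infix of xs ++ [c] that is not an infix of xs is a suffix of xs ++ [c]
lemma infix_concat_not_infix {α : Type} (w xs : List α) (c : α)
    (h : w <:+: xs ++ [c]) (hn : ¬ w <:+: xs) : w <:+ xs ++ [c] := by
  obtain ⟨s, t, hst⟩ := h
  rcases List.eq_nil_or_concat t with rfl | ⟨t', c', rfl⟩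
  · exact ⟨s, by simpa using hst⟩
  · exfalso
    apply hn
    have : (s ++ w ++ t') ++ [c'] = xs ++ [c] := by simpa using hst
    have h2 := List.append_inj' this rfl
    exact ⟨s, t', h2.1⟩

-- the two inner-loop tests agree as long as no (nonempty) word was already contained
lemma pred_eq (w : List Char) (seen : List Char) (c : Char)
    (hw : w = [] ∨ ¬ w <:+: seen) :
    PySem.Chars.isIn w (seen ++ [c]) = PySem.Chars.endswith (seen ++ [c]) w := by
  by_cases hs : w <:+ seen ++ [c]
  · rw [(PySem.Chars.isIn_iff_infix w (seen ++ [c])).2 hs.isInfix,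
      (PySem.Chars.endswith_iff (seen ++ [c]) w).2 hs]
  · have hni : ¬ w <:+: seen ++ [c] := by
      intro hinf
      rcases hw with rfl | hn
      · exact hs List.nil_suffix
      · exact hs (infix_concat_not_infix w seen c hinf hn)
    rw [(PySem.Chars.isIn_eq_false_iff w (seen ++ [c])).2 hni]
    cases he : PySem.Chars.endswith (seen ++ [c]) w
    · rfl
    · exact absurd ((PySem.Chars.endswith_iff (seen ++ [c]) w).1 he) hs

-- find? only depends on the predicate's values on the list
lemma find?_congr_mem {α : Type} (l : List α) (p q : α → Bool)
    (h : ∀ x ∈ l, p x = q x) : l.find? p = l.find? q := by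
  induction l with
  | nil => rfl
  | cons x xs ih =>
    simp only [List.find?_cons, h x (List.mem_cons_self)]
    cases q x
    · exact ih fun y hy => h y (List.mem_cons_of_mem _ hy)
    · rfl

-- main loop correspondence
lemma goA_eq_goB (d : PySem.Dict String Int) (hnd : d.keys.Nodup) (S : List Char) (seen rest : List Char)
    (hS : S = seen ++ rest)
    (hinv : ∀ w ∈ d.keys, w.toList = [] ∨ ¬ w.toList <:+: seen) :
    pvGoA d seen rest = pvGoB S d.items seen.length := by
  induction rest generalizing seen with
  | nil =>
    rw [pvGoB]
    simp [pvGoA, hS]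
  | cons c cs ih =>
    have hlt : seen.length < S.length := by subst hS; simp
    have hget : S[seen.length]'hlt = c := by
      subst hS; simp [List.getElem_append_right]
    rw [pvGoB]
    rw [dif_pos hlt]
    simp only [hget]
    by_cases hdig : PySem.Chars.isdigit c
    · simp [pvGoA, hdig]
    · rw [if_neg hdig]
      simp only [pvGoA, if_neg hdig]
      -- align the two find?s
      have htake : S.take (seen.length + 1) = seen ++ [c] := by
        subst hS
        rw [List.take_append]
        simp
      have hfind : d.items.find? (pvSuffixHit S seen.length)
          = d.items.find? (fun p => PySem.Chars.isIn p.1.toList (seen ++ [c])) := by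
        apply find?_congr_mem
        intro p hp
        have hw := hinv p.1 (List.mem_map_of_mem hp)
        rw [pvSuffixHit, htake, pred_eq p.1.toList seen c hw]
      have hkeys : d.keys.find? (fun w => PySem.Chars.isIn w.toList (seen ++ [c]))
          = (d.items.find? (fun p => PySem.Chars.isIn p.1.toList (seen ++ [c]))).map Prod.fst := by
        rw [PySem.Dict.keys, List.find?_map]
        rfl
      cases hfd : d.items.find? (fun p => PySem.Chars.isIn p.1.toList (seen ++ [c])) with
      | some p =>
        rw [hfind, hfd, hkeys, hfd]
        simp only [Option.map_some]
        -- A looks the key up again; with nodup keys this returns the paired value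
        have hpm : (p.1, p.2) ∈ d.items := by simpa using List.mem_of_find?_eq_some hfd
        exact PySem.Dict.getD_of_mem_items d hpm hnd 0
      | none =>
        rw [hfind, hfd, hkeys, hfd]
        simp only [Option.map_none]
        have hrec := ih (seen ++ [c]) (by simpa using hS) ?_
        · simpa using hrec
        · intro w hwk
          by_cases hnil : w.toList = []
          · exact Or.inl hnil
          · right
            intro hinf
            have := List.find?_eq_none.1 hfd
            have hwmem : ∃ v, (w, v) ∈ d.items := by
              obtain ⟨p, hp, hp1⟩ := List.mem_map.1 hwk
              exact ⟨p.2, by rw [← hp1]; simpa using hp⟩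
            obtain ⟨v, hv⟩ := hwmem
            have := this (w, v) hv
            simp [(PySem.Chars.isIn_iff_infix w.toList (seen ++ [c])).2 hinf] at this

-- ===== VERDICT (by name: the statement is the Claim_ definition above) =====
theorem get_left_most_digit_spec : Claim_equal_get_left_most_digit := by
  intro line wd _
  unfold Spec_get_left_most_digit get_left_most_digit get_left_most_digit_alt
  have := goA_eq_goB (PySem.Dict.ofList wd) (PySem.Dict.nodup_keys_ofList wd) line.toList [] line.toList rfl ?_
  · simpa using this
  · intro w _
    by_cases h : w.toList = []
    · exact Or.inl h
    · exact Or.inr (by intro hi; exact h (List.eq_nil_of_infix_nil hi))
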